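-- pv_equiv track=rewrite | github.com/sohn0356-git/algorithm_study | Haebum/초급반/p_여행경로.py | solution
-- ===== SOURCE A (Python) =====
-- def solution(tickets):
--     routes = dict()
--     tickets.sort(reverse=True)
--     for t1, t2 in tickets:
--         if t1 in routes:
--             routes[t1].append(t2)
--         else:
--             routes[t1] = [t2]
--     st = ['ICN']
--     ans = []
--     while st:
--         top = st[-1]
--         if top not in routes or len(routes[top])==0:
--             ans.append(st.pop())
--         else:
--             st.append(routes[top].pop())
--     ans.reverse()
--     return ans
-- ===== SOURCE B (Python) =====
-- def solution(tickets):
--     # Same in-place reverse sort and reversed adjacency dict as the original;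
--     # the Eulerian walk is done by a recursive Hierholzer dfs instead of an
--     # explicit stack loop.
--     tickets.sort(reverse=True)
--     routes = {}
--     for t1, t2 in tickets:
--         routes.setdefault(t1, []).append(t2)
--     ans = []
--
--     def dfs(node):
--         while routes.get(node):
--             dfs(routes[node].pop())
--         ans.append(node)
--
--     dfs('ICN')
--     ans.reverse()
--     return ans
-- ===== Notes on version B (the rewrite author's own statement) =====
-- stated objective: alternative
-- what changed: The explicit-stack while-loop of Hierholzer's algorithm is replaced by a recursive dfs helper (post-order append via the call stack) over the same reverse-sorted adjacency dict, now built with setdefault.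
import Mathlib
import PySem

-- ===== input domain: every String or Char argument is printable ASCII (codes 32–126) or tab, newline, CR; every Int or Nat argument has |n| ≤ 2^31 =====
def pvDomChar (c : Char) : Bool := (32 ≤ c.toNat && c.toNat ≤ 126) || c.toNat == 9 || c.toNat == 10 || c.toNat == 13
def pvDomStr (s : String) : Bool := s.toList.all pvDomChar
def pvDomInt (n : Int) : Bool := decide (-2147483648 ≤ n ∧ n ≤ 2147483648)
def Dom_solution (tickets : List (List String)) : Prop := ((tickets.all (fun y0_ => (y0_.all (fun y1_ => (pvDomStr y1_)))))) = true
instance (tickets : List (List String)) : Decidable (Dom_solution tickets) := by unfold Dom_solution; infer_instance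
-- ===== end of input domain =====

-- B replaces A's explicit-stack Hierholzer loop with a recursive dfs (post-order append) over the
-- same reverse-sorted adjacency dict; objective: alternative decomposition, same cost.
-- Both Pythons sort `tickets` in place (same mutation); the equivalence proved is about the return value.

-- ===== PORT A =====
-- for t1, t2 in tickets: if t1 in routes: routes[t1].append(t2) else: routes[t1] = [t2]
-- (a row that is not a 2-element list raises ValueError in Python: outside Pre_; the port skips it)
def pvStepA (d : PySem.Dict String (List String)) (t : List String) :
    PySem.Dict String (List String) :=
  match t with
  | [t1, t2] =>
    match d.get? t1 with
    | some l => d.insert t1 (l ++ [t2])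
    | none => d.insert t1 [t2]
  | _ => d

-- the while-loop over the explicit stack st: top = st[-1]; either pop st into ans or push the
-- popped smallest neighbour.  The fuel argument only makes the loop total (2*edges+|st|+1 suffices,
-- see pvLoopA_total); none = fuel ran out, never reached from solution.
def pvLoopA : Nat → PySem.Dict String (List String) → List String → List String →
    Option (List String)
  | 0, _, _, _ => none
  | fuel + 1, routes, st, ans =>
    if st.isEmpty then some ans
    else
      match routes.get? (st.getLastD "") with
      | none => pvLoopA fuel routes st.dropLast (ans ++ [st.getLastD ""])
      | some l =>
        if l.isEmpty then pvLoopA fuel routes st.dropLast (ans ++ [st.getLastD ""])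
        else pvLoopA fuel (routes.insert (st.getLastD "") l.dropLast) (st ++ [l.getLastD ""]) ans

def solution (tickets : List (List String)) : List String :=
  let sorted := PySem.List.sorted tickets (fun t => t.map (·.toList)) true
  let routes := sorted.foldl pvStepA PySem.Dict.empty
  ((pvLoopA (2 * tickets.length + 2) routes ["ICN"] []).getD []).reverse

-- ===== PORT B =====
-- routes.setdefault(t1, []).append(t2)
def pvStepB (d : PySem.Dict String (List String)) (t : List String) :
    PySem.Dict String (List String) :=
  match t with
  | [t1, t2] => d.modify t1 [] (· ++ [t2])
  | _ => d

-- def dfs(node): while routes.get(node): dfs(routes[node].pop()); ans.append(node)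
-- returned pair = (routes after the call, the segment this call appends to ans, in order);
-- one while-iteration = the recursive call on the popped neighbour followed by re-entering the
-- loop on the same node (the second recursive call, which also does the final append of node).
-- The fuel argument only makes the recursion total (2*edges+1 suffices, see pvDfsB_total).
def pvDfsB : Nat → PySem.Dict String (List String) → String →
    Option (PySem.Dict String (List String) × List String)
  | 0, _, _ => none
  | fuel + 1, routes, node =>
    match routes.get? node with
    | none => some (routes, [node])
    | some l =>
      if l.isEmpty then some (routes, [node])
      else
        match pvDfsB fuel (routes.insert node l.dropLast) (l.getLastD "") with
        | none => none
        | some (r1, a1) =>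
          match pvDfsB fuel r1 node with
          | none => none
          | some (r2, a2) => some (r2, a1 ++ a2)

def solution_alt (tickets : List (List String)) : List String :=
  let sorted := PySem.List.sorted tickets (fun t => t.map (·.toList)) true
  let routes := sorted.foldl pvStepB PySem.Dict.empty
  (((pvDfsB (2 * tickets.length + 2) routes "ICN").getD (PySem.Dict.empty, [])).2).reverse

-- ===== PRECONDITION & SPEC =====
-- Pre_ excludes exactly the inputs on which Python raises: a row that is not a 2-element list makes
-- `for t1, t2 in tickets` raise ValueError (in A and in B alike).
def Pre_solution (tickets : List (List String)) : Prop := ∀ t ∈ tickets, t.length = 2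
instance (tickets : List (List String)) : Decidable (Pre_solution tickets) := by
  unfold Pre_solution; infer_instance
def pvWitness_solution : List (List String) := [["ICN", "AAA"], ["AAA", "ICN"]]

def Spec_solution (tickets : List (List String)) (out : List String) : Prop :=
  out = solution_alt tickets
instance (tickets : List (List String)) (out : List String) : Decidable (Spec_solution tickets out) := by
  unfold Spec_solution; infer_instance

-- ===== CLAIM (what is proved, stated in full; the proofs are below) =====
def Claim_equal_solution : Prop := ∀ (tickets : List (List String)), Dom_solution tickets →
  Pre_solution tickets → Spec_solution tickets (solution tickets)

-- ===== LEMMAS AND PROOFS =====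

-- total number of edges still stored in the adjacency dict
def pvEf (d : PySem.Dict String (List String)) : Nat :=
  (d.items.map (fun p => p.2.length)).sum

theorem pv_sum_replace (its : List (String × List String)) (k : String) (v l : List String)
    (hnd : (its.map (·.1)).Nodup) (hmem : (k, l) ∈ its) :
    ((its.map (fun p => if p.1 == k then (k, v) else p)).map (fun p => p.2.length)).sum + l.length
      = (its.map (fun p => p.2.length)).sum + v.length := by
  induction its with
  | nil => simp at hmem
  | cons p rest ih =>
    simp only [List.map_cons, List.nodup_cons, List.mem_map] at hnd
    rcases List.mem_cons.mp hmem with h | h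
    · subst h
      have hrest : rest.map (fun p => if p.1 == k then (k, v) else p) = rest := by
        conv_rhs => rw [← List.map_id rest]
        apply List.map_congr_left
        intro q hq
        have hq1 : ¬((q.1 == k) = true) := by
          simp only [beq_iff_eq]
          intro e; exact hnd.1 ⟨q, hq, e⟩
        simp [hq1]
      simp only [List.map_cons, beq_self_eq_true, if_pos, hrest, List.sum_cons]
      omega
    · have hne : ¬((p.1 == k) = true) := by
        simp only [beq_iff_eq]
        intro e
        exact hnd.1 ⟨(k, l), h, by rw [e]⟩
      simp only [List.map_cons, List.sum_cons, if_neg hne]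
      have := ih hnd.2 h
      omega

theorem pvEf_insert_some (d : PySem.Dict String (List String)) (k : String) (v l : List String)
    (hnd : d.keys.Nodup) (h : d.get? k = some l) :
    pvEf (d.insert k v) + l.length = pvEf d + v.length := by
  have hc : d.contains k = true := by
    rw [PySem.Dict.contains_eq_isSome_get?, h]; rfl
  have hmem : (k, l) ∈ d.items := PySem.Dict.mem_items_of_get?_eq_some d h
  have hnd' : (d.items.map (·.1)).Nodup := by simpa [PySem.Dict.keys] using hnd
  unfold pvEf
  rw [PySem.Dict.items_insert_of_contains _ _ hc]
  exact pv_sum_replace d.items k v l hnd' hmem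

theorem pvEf_insert_none (d : PySem.Dict String (List String)) (k : String) (v : List String)
    (h : d.get? k = none) :
    pvEf (d.insert k v) = pvEf d + v.length := by
  have hc : d.contains k = false := by
    rw [PySem.Dict.contains_eq_isSome_get?, h]; rfl
  unfold pvEf
  rw [PySem.Dict.items_insert_of_not_contains _ _ hc]
  simp

theorem pvStep_eq : pvStepB = pvStepA := by
  funext d t
  match t with
  | [] => rfl
  | [_] => rfl
  | t1 :: t2 :: _ :: _ => rfl
  | [t1, t2] =>
    show d.insert t1 (d.getD t1 [] ++ [t2]) = _
    rw [PySem.Dict.getD_eq_get?_getD]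
    cases h : d.get? t1 with
    | some l => simp [pvStepA, h]
    | none => simp [pvStepA, h]

theorem pvBuild_inv (ts : List (List String)) : ∀ d : PySem.Dict String (List String),
    d.keys.Nodup →
    (ts.foldl pvStepA d).keys.Nodup ∧ pvEf (ts.foldl pvStepA d) ≤ pvEf d + ts.length := by
  induction ts with
  | nil => intro d hnd; simpa using hnd
  | cons t ts ih =>
    intro d hnd
    have hstep : (pvStepA d t).keys.Nodup ∧ pvEf (pvStepA d t) ≤ pvEf d + 1 := by
      rcases t with _ | ⟨t1, _ | ⟨t2, _ | ⟨t3, rest⟩⟩⟩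
      · exact ⟨hnd, by simp [pvStepA]⟩
      · exact ⟨hnd, by simp [pvStepA]⟩
      case cons.cons.cons => exact ⟨hnd, by simp [pvStepA]⟩
      · cases h : d.get? t1 with
        | some l =>
          have e : pvStepA d [t1, t2] = d.insert t1 (l ++ [t2]) := by simp [pvStepA, h]
          rw [e]
          refine ⟨PySem.Dict.nodup_keys_insert _ _ _ hnd, ?_⟩
          have := pvEf_insert_some d t1 (l ++ [t2]) l hnd h
          simp at this; omega
        | none =>
          have e : pvStepA d [t1, t2] = d.insert t1 [t2] := by simp [pvStepA, h]
          rw [e]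
          refine ⟨PySem.Dict.nodup_keys_insert _ _ _ hnd, ?_⟩
          have := pvEf_insert_none d t1 [t2] h
          simp at this; omega
    have := ih (pvStepA d t) hstep.1
    simp only [List.foldl_cons]
    exact ⟨this.1, by have h2 := this.2; have h3 := hstep.2; simp only [List.length_cons]; omega⟩

theorem pvLoopA_mono (f : Nat) : ∀ r st ans v, pvLoopA f r st ans = some v →
    pvLoopA (f + 1) r st ans = some v := by
  induction f with
  | zero => intro r st ans v h; simp [pvLoopA] at h
  | succ f ih =>
    intro r st ans v h
    rw [pvLoopA] at h
    rw [pvLoopA]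
    by_cases hst : st.isEmpty
    · rw [if_pos hst] at h ⊢; exact h
    · rw [if_neg hst] at h ⊢
      cases hg : r.get? (st.getLastD "") with
      | none => simp only [hg] at h ⊢; exact ih _ _ _ _ h
      | some l =>
        simp only [hg] at h ⊢
        by_cases he : l.isEmpty
        · rw [if_pos he] at h ⊢; exact ih _ _ _ _ h
        · rw [if_neg he] at h ⊢; exact ih _ _ _ _ h

theorem pvLoopA_mono_le (f g : Nat) (hfg : f ≤ g) (r : PySem.Dict String (List String))
    (st ans v : List String) (h : pvLoopA f r st ans = some v) : pvLoopA g r st ans = some v := by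
  induction g with
  | zero => exact (by omega : f = 0) ▸ h
  | succ g ih =>
    rcases Nat.lt_or_ge f (g + 1) with hlt | hge
    · exact pvLoopA_mono g r st ans v (ih (by omega))
    · exact (by omega : f = g + 1) ▸ h

theorem pvDfsB_total (f : Nat) : ∀ r n, r.keys.Nodup → 2 * pvEf r + 1 ≤ f →
    ∃ r' a, pvDfsB f r n = some (r', a) ∧ r'.keys.Nodup ∧ pvEf r' ≤ pvEf r := by
  induction f with
  | zero => intro r n _ hf; omega
  | succ f ih =>
    intro r n hnd hf
    rw [pvDfsB]
    cases hg : r.get? n with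
    | none => exact ⟨r, [n], rfl, hnd, le_refl _⟩
    | some l =>
      by_cases he : l.isEmpty
      · simp only [if_pos he]
        exact ⟨r, [n], rfl, hnd, le_refl _⟩
      · simp only [if_neg he]
        have hlen : 1 ≤ l.length := by
          cases l with
          | nil => simp at he
          | cons a as => simp
        have hefr : pvEf (r.insert n l.dropLast) + 1 = pvEf r := by
          have := pvEf_insert_some r n l.dropLast l hnd hg
          have hd : l.dropLast.length = l.length - 1 := List.length_dropLast
          omega
        have hnd1 : (r.insert n l.dropLast).keys.Nodup := PySem.Dict.nodup_keys_insert _ _ _ hnd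
        obtain ⟨r1, a1, h1, hnd2, hef1⟩ := ih (r.insert n l.dropLast) (l.getLastD "") hnd1 (by omega)
        simp only [h1]
        obtain ⟨r2, a2, h2, hnd3, hef2⟩ := ih r1 n hnd2 (by omega)
        simp only [h2]
        exact ⟨r2, a1 ++ a2, rfl, hnd3, by omega⟩

theorem pvLoopA_total (f : Nat) : ∀ r st ans, r.keys.Nodup → 2 * pvEf r + st.length + 1 ≤ f →
    ∃ v, pvLoopA f r st ans = some v := by
  induction f with
  | zero => intro r st ans _ hf; omega
  | succ f ih =>
    intro r st ans hnd hf
    rw [pvLoopA]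
    by_cases hst : st.isEmpty
    · exact ⟨ans, by rw [if_pos hst]⟩
    · rw [if_neg hst]
      have hstlen : 1 ≤ st.length := by
        cases st with
        | nil => simp at hst
        | cons a as => simp
      cases hg : r.get? (st.getLastD "") with
      | none =>
        obtain ⟨v, hv⟩ := ih r st.dropLast (ans ++ [st.getLastD ""]) hnd
          (by have hd : st.dropLast.length = st.length - 1 := List.length_dropLast; omega)
        exact ⟨v, hv⟩
      | some l =>
        simp only []
        by_cases he : l.isEmpty
        · rw [if_pos he]
          obtain ⟨v, hv⟩ := ih r st.dropLast (ans ++ [st.getLastD ""]) hnd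
            (by have hd : st.dropLast.length = st.length - 1 := List.length_dropLast; omega)
          exact ⟨v, hv⟩
        · rw [if_neg he]
          have hlen : 1 ≤ l.length := by
            cases l with
            | nil => simp at he
            | cons a as => simp
          have hefr : pvEf (r.insert (st.getLastD "") l.dropLast) + 1 = pvEf r := by
            have := pvEf_insert_some r (st.getLastD "") l.dropLast l hnd hg
            have hd : l.dropLast.length = l.length - 1 := List.length_dropLast
            omega
          obtain ⟨v, hv⟩ := ih (r.insert (st.getLastD "") l.dropLast) (st ++ [l.getLastD ""]) ans
            (PySem.Dict.nodup_keys_insert _ _ _ hnd) (by simp only [List.length_append, List.length_cons, List.length_nil]; omega)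
          exact ⟨v, hv⟩

theorem pvCorr (f : Nat) : ∀ r n r' acc, pvDfsB f r n = some (r', acc) →
    ∀ st ans res g, pvLoopA g r' st (ans ++ acc) = some res →
      ∃ h, pvLoopA h r (st ++ [n]) ans = some res := by
  induction f with
  | zero => intro r n r' acc h; simp [pvDfsB] at h
  | succ f ih =>
    intro r n r' acc h st ans res g hloop
    rw [pvDfsB] at h
    have hne : (st ++ [n]).isEmpty = false := by simp
    have htop : (st ++ [n]).getLastD "" = n := by
      simp [List.getLastD_eq_getLast?]
    have hdrop : (st ++ [n]).dropLast = st := by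
      simp
    cases hg : r.get? n with
    | none =>
      simp only [hg] at h
      obtain ⟨he1, he2⟩ := Prod.mk.injEq .. ▸ (Option.some.injEq .. ▸ h)
      refine ⟨g + 1, ?_⟩
      rw [pvLoopA, if_neg (by simp), htop, hg, hdrop]
      rw [← he1, ← he2] at hloop
      exact hloop
    | some l =>
      simp only [hg] at h
      by_cases he : l.isEmpty
      · rw [if_pos he] at h
        obtain ⟨he1, he2⟩ := Prod.mk.injEq .. ▸ (Option.some.injEq .. ▸ h)
        refine ⟨g + 1, ?_⟩
        rw [pvLoopA, if_neg (by simp), htop]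
        simp only [hg]
        rw [if_pos he, hdrop]
        rw [← he1, ← he2] at hloop
        exact hloop
      · rw [if_neg he] at h
        cases h1 : pvDfsB f (r.insert n l.dropLast) (l.getLastD "") with
        | none => rw [h1] at h; simp at h
        | some p1 =>
          obtain ⟨r1, a1⟩ := p1
          simp only [h1] at h
          cases h2 : pvDfsB f r1 n with
          | none => rw [h2] at h; simp at h
          | some p2 =>
            obtain ⟨r2, a2⟩ := p2
            simp only [h2] at h
            simp only [Option.some.injEq, Prod.mk.injEq] at h
            obtain ⟨he1, he2⟩ := h
            -- finish the while loop on n, then the dfs on the popped child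
            have hloop2 : pvLoopA g r' st ((ans ++ a1) ++ a2) = some res := by
              rw [← he2] at hloop
              rw [List.append_assoc]
              exact hloop
            obtain ⟨g1, hg1⟩ := ih r1 n r' a2 (he1 ▸ h2) st (ans ++ a1) res g hloop2
            obtain ⟨g2, hg2⟩ := ih (r.insert n l.dropLast) (l.getLastD "") r1 a1 h1
              (st ++ [n]) ans res g1 hg1
            refine ⟨g2 + 1, ?_⟩
            rw [pvLoopA, if_neg (by simp), htop]
            simp only [hg]
            rw [if_neg he]
            exact hg2

theorem solution_eq_alt (tickets : List (List String)) :
    solution tickets = solution_alt tickets := by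
  unfold solution solution_alt
  rw [pvStep_eq]
  have hlen : (PySem.List.sorted tickets (fun t => t.map (·.toList)) true).length
      = tickets.length := PySem.List.length_sorted ..
  have hbuild := pvBuild_inv (PySem.List.sorted tickets (fun t => t.map (·.toList)) true)
    PySem.Dict.empty PySem.Dict.nodup_keys_empty
  have hef0 : pvEf PySem.Dict.empty = 0 := rfl
  obtain ⟨r', acc, hdfs, _, _⟩ := pvDfsB_total (2 * tickets.length + 2)
    ((PySem.List.sorted tickets (fun t => t.map (·.toList)) true).foldl pvStepA PySem.Dict.empty)
    "ICN" hbuild.1 (by omega)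
  have hbase : pvLoopA 1 r' [] (([] : List String) ++ acc) = some acc := by
    simp [pvLoopA]
  obtain ⟨h, hA⟩ := pvCorr (2 * tickets.length + 2) _ "ICN" r' acc hdfs [] [] acc 1 hbase
  rw [List.nil_append] at hA
  obtain ⟨v, hv⟩ := pvLoopA_total (2 * tickets.length + 2)
    ((PySem.List.sorted tickets (fun t => t.map (·.toList)) true).foldl pvStepA PySem.Dict.empty)
    ["ICN"] [] hbuild.1 (by simp only [List.length_cons, List.length_nil]; omega)
  have h1 := pvLoopA_mono_le (2 * tickets.length + 2) (max (2 * tickets.length + 2) h)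
    (le_max_left _ _) _ _ _ _ hv
  have h2 := pvLoopA_mono_le h (max (2 * tickets.length + 2) h) (le_max_right _ _) _ _ _ _ hA
  have hva : v = acc := by
    rw [h1] at h2
    exact (Option.some.injEq _ _ ▸ h2)
  show ((pvLoopA (2 * tickets.length + 2)
      (List.foldl pvStepA PySem.Dict.empty
        (PySem.List.sorted tickets (fun t => List.map (fun x => x.toList) t) true))
      ["ICN"] []).getD []).reverse
    = ((pvDfsB (2 * tickets.length + 2)
      (List.foldl pvStepA PySem.Dict.empty
        (PySem.List.sorted tickets (fun t => List.map (fun x => x.toList) t) true))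
      "ICN").getD (PySem.Dict.empty, [])).2.reverse
  rw [hv, hdfs]
  simp [hva]

-- ===== VERDICT (by name: the statement is the Claim_ definition above) =====
theorem solution_spec : Claim_equal_solution := by
  intro tickets _dom _pre
  exact solution_eq_alt tickets
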